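-- pv_equiv track=rewrite | github.com/Kazun1998/library_for_python | Integer.py | Reminder_Enumeration
-- ===== SOURCE A (Python) =====
-- def Reminder_Enumeration(N,r):
--     """ N を q 割った余りが r になる q を全て列挙する.
--
--     N: 正整数
--     r: 非負整数, N!=r
--     """
--
--     assert N!=r,"無限個あります."
--
--     k=1
--     X=[];Y=[]
--     N-=r
--     while k*k<=N:
--         if N%k==0:
--             if k>r:
--                 X.append(k)
--             if k*k!=N and N//k>r:
--                 Y.append(N//k)
--         k+=1
--     return X+Y[::-1]
-- ===== SOURCE B (Python) =====
-- def Reminder_Enumeration(N, r):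
--     """ N を q 割った余りが r になる q を全て列挙する.
--
--     N: 正整数
--     r: 非負整数, N!=r
--     """
--
--     assert N != r, "無限個あります."
--     m = N - r
--     divs = [1] if m >= 1 else []
--     p = 2
--     while p * p <= m:
--         block = divs
--         while m % p == 0:
--             m //= p
--             block = [d * p for d in block]
--             divs = divs + block
--         p += 1
--     if m > 1:
--         divs = divs + [d * m for d in divs]
--     return sorted({d for d in divs if d > r})
-- ===== Notes on version B (the rewrite author's own statement) =====
-- stated objective: alternative
-- what changed: B abandons A's sqrt-bounded two-list pairing scan (small divisors in X, complements M//k in Y, output X+Y[::-1]) and instead prime-factorises M=N-r by trial division with the remaining cofactor shrinking, multiplies the divisor pool out of the factor powers, and returns sorted({d for d in pool if d > r}).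
import Mathlib
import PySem

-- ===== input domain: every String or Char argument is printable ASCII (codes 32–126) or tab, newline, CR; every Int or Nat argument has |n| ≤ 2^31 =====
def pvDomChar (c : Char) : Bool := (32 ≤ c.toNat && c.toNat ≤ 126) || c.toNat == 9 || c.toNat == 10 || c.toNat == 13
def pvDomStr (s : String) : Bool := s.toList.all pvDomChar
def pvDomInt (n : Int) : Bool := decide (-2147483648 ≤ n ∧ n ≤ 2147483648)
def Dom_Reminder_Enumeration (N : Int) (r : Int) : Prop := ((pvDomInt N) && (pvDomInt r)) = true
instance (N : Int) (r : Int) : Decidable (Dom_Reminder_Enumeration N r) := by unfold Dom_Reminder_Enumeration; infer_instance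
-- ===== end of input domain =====

-- B replaces A's √M two-list divisor pairing by prime factorisation of M = N - r with
-- divisor generation from the factor powers, then one final sort; a different algorithm.

-- ===== PORT A =====
-- termination helper for A's while loop (cited in decreasing_by)
theorem pv_le_of_sq_le {M k : Int} (h : k * k ≤ M) : k ≤ M := by
  nlinarith [sq_nonneg k, sq_nonneg (k - 1)]

-- A's while loop: k from 1 while k*k ≤ M, maintaining the two lists X and Y.
def pvLoopA (M r k : Int) (X Y : List Int) : List Int × List Int :=
  if _h : k * k ≤ M then
    if PySem.Int.mod M k = 0 then
      pvLoopA M r (k + 1)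
        (if r < k then X ++ [k] else X)
        (if k * k ≠ M ∧ r < PySem.Int.floordiv M k then Y ++ [PySem.Int.floordiv M k] else Y)
    else
      pvLoopA M r (k + 1) X Y
  else (X, Y)
termination_by (M + 1 - k).toNat
decreasing_by
  all_goals
    have hk : k ≤ M := pv_le_of_sq_le _h
    omega

def Reminder_Enumeration (N : Int) (r : Int) : List Int :=
  (pvLoopA (N - r) r 1 [] []).1 ++ (pvLoopA (N - r) r 1 [] []).2.reverse

-- ===== PORT B =====
-- B's inner while loop: while m % p == 0: m //= p; block = [d*p for d in block]; divs = divs + block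
-- (fuel only makes the recursion total; it is never exhausted on inputs the program reaches)
def pvFactInner : Nat → Int → Int → List Int → List Int → Int × List Int
  | 0, m, _, _, divs => (m, divs)
  | Nat.succ f, m, p, block, divs =>
    if PySem.Int.mod m p = 0 then
      pvFactInner f (PySem.Int.floordiv m p) p (block.map (fun d => d * p))
        (divs ++ block.map (fun d => d * p))
    else (m, divs)

-- B's outer while loop: while p * p <= m, with block initialised to divs
def pvFactOuter : Nat → Int → Int → List Int → Int × List Int
  | 0, m, _, divs => (m, divs)
  | Nat.succ f, m, p, divs =>
    if p * p ≤ m then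
      pvFactOuter f (pvFactInner m.toNat m p divs divs).1 (p + 1)
        (pvFactInner m.toNat m p divs divs).2
    else (m, divs)

def Reminder_Enumeration_alt (N : Int) (r : Int) : List Int :=
  let res := pvFactOuter ((N - r).toNat + 1) (N - r) 2 (if 1 ≤ N - r then [1] else [])
  let divs := if 1 < res.1 then res.2 ++ res.2.map (fun d => d * res.1) else res.2
  PySem.List.sorted (PySem.Set.ofList (divs.filter (fun d => decide (r < d)))) id

-- ===== PRECONDITION & SPEC =====
-- A asserts N != r (AssertionError); Pre_ excludes exactly that input line.
def Pre_Reminder_Enumeration (N : Int) (r : Int) : Prop := N ≠ r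
instance (N : Int) (r : Int) : Decidable (Pre_Reminder_Enumeration N r) := by unfold Pre_Reminder_Enumeration; infer_instance
def pvWitness_Reminder_Enumeration : Int × Int := (12, 2)

def Spec_Reminder_Enumeration (N : Int) (r : Int) (out : List Int) : Prop := out = Reminder_Enumeration_alt N r
instance (N : Int) (r : Int) (out : List Int) : Decidable (Spec_Reminder_Enumeration N r out) := by unfold Spec_Reminder_Enumeration; infer_instance

-- ===== CLAIM (what is proved, stated in full; the proofs are below) =====
def Claim_equal_Reminder_Enumeration : Prop := ∀ (N : Int) (r : Int), Dom_Reminder_Enumeration N r → Pre_Reminder_Enumeration N r → Spec_Reminder_Enumeration N r (Reminder_Enumeration N r)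

-- ===== LEMMAS AND PROOFS =====

-- ---------- A side: A's output is the ascending scan of all divisors of M above r ----------

-- a tail of the scan whose lower end already exceeds √M contributes nothing
theorem pv_filt_nil_of_sq_gt (M k : Int) (hk : 1 ≤ k) (h : ¬ k * k ≤ M)
    (p : Int → Prop) [DecidablePred p] :
    (PySem.List.pyRange k (M + 1) 1).filter (fun d => decide (d * d ≤ M ∧ p d)) = [] := by
  apply List.filter_eq_nil_iff.2
  intro d hd
  have h1 := (PySem.List.mem_pyRange_one.1 hd).1
  simp only [decide_eq_true_eq, not_and]
  intro hdd
  exact absurd hdd (by intro _; exact h (by nlinarith))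

-- full-run characterisation of A's loop: X collects the small divisors > r,
-- Y the corresponding complements M//d > r (square excluded), in scan order
theorem pvLoopA_spec (M r : Int) : ∀ (n : Nat) (k : Int), 1 ≤ k → (M + 1 - k).toNat ≤ n →
    ∀ (X Y : List Int),
    pvLoopA M r k X Y =
      (X ++ (PySem.List.pyRange k (M + 1) 1).filter
              (fun d => decide (d * d ≤ M ∧ (PySem.Int.mod M d = 0 ∧ r < d))),
       Y ++ ((PySem.List.pyRange k (M + 1) 1).filter
              (fun d => decide (d * d ≤ M ∧ (PySem.Int.mod M d = 0 ∧ d * d ≠ M ∧ r < PySem.Int.floordiv M d)))).map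
            (fun d => PySem.Int.floordiv M d)) := by
  intro n
  induction n with
  | zero =>
    intro k hk1 hn X Y
    have h : ¬ k * k ≤ M := fun h => by have := pv_le_of_sq_le h; omega
    rw [pvLoopA.eq_def, dif_neg h,
      pv_filt_nil_of_sq_gt M k hk1 h (fun d => PySem.Int.mod M d = 0 ∧ r < d),
      pv_filt_nil_of_sq_gt M k hk1 h (fun d => PySem.Int.mod M d = 0 ∧ d * d ≠ M ∧ r < PySem.Int.floordiv M d)]
    simp
  | succ n ih =>
    intro k hk1 hn X Y
    rw [pvLoopA.eq_def]
    by_cases h : k * k ≤ M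
    · have hk := pv_le_of_sq_le h
      have hfuel : (M + 1 - (k + 1)).toNat ≤ n := by omega
      rw [dif_pos h, PySem.List.pyRange_one_cons (by omega : k < M + 1)]
      by_cases hm : PySem.Int.mod M k = 0
      · rw [if_pos hm, ih (k + 1) (by omega) hfuel]
        simp only [List.filter_cons, decide_eq_true_eq, h, hm, true_and]
        by_cases hx : r < k <;> by_cases hy : k * k ≠ M ∧ r < PySem.Int.floordiv M k <;>
          simp [hx, hy, List.append_assoc]
      · rw [if_neg hm, ih (k + 1) (by omega) hfuel]
        simp [hm]
    · rw [dif_neg h,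
        pv_filt_nil_of_sq_gt M k hk1 h (fun d => PySem.Int.mod M d = 0 ∧ r < d),
        pv_filt_nil_of_sq_gt M k hk1 h (fun d => PySem.Int.mod M d = 0 ∧ d * d ≠ M ∧ r < PySem.Int.floordiv M d)]
      simp

-- exact division: if M = d*c with d ≥ 1 then M // d = c
theorem pv_floordiv_exact (M d c : Int) (hd : 1 ≤ d) (h : M = d * c) :
    PySem.Int.floordiv M d = c := by
  rw [PySem.Int.floordiv_eq_ediv_of_pos (by omega : (0:Int) < d), h,
    Int.mul_ediv_cancel_left c (by omega : d ≠ 0)]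

-- the pairing: the reversed complement list is exactly the ascending scan of the
-- divisors above √M
theorem pv_pairing (M r s : Int) (hM : 1 ≤ M) (hs1 : 1 ≤ s) (hsle : s * s ≤ M)
    (hslt : M < (s + 1) * (s + 1)) :
    (((PySem.List.pyRange 1 (M + 1) 1).filter
        (fun d => decide (d * d ≤ M ∧ (PySem.Int.mod M d = 0 ∧ d * d ≠ M ∧ r < PySem.Int.floordiv M d)))).map
      (fun d => PySem.Int.floordiv M d)).reverse
    = (PySem.List.pyRange (s + 1) (M + 1) 1).filter (fun q => decide (PySem.Int.mod M q = 0 ∧ r < q)) := by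
  set F2 := (PySem.List.pyRange 1 (M + 1) 1).filter
      (fun d => decide (d * d ≤ M ∧ (PySem.Int.mod M d = 0 ∧ d * d ≠ M ∧ r < PySem.Int.floordiv M d))) with hF2
  set R := (F2.map (fun d => PySem.Int.floordiv M d)).reverse with hR
  set T2 := (PySem.List.pyRange (s + 1) (M + 1) 1).filter
      (fun q => decide (PySem.Int.mod M q = 0 ∧ r < q)) with hT2
  have hmemF2 : ∀ d ∈ F2, 1 ≤ d ∧ d * d ≤ M ∧ d ∣ M ∧ d * d ≠ M ∧ r < PySem.Int.floordiv M d := by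
    intro d hd
    have := List.mem_filter.1 hd
    have hrange := PySem.List.mem_pyRange_one.1 this.1
    have hp := of_decide_eq_true this.2
    exact ⟨hrange.1, hp.1, (PySem.Int.mod_eq_zero_iff_dvd M d).1 hp.2.1, hp.2.2.1, hp.2.2.2⟩
  have hpairF2 : List.Pairwise (· < ·) F2 :=
    (PySem.List.pairwise_lt_pyRange_one 1 (M + 1)).filter _
  have hpairR : List.Pairwise (· < ·) R := by
    rw [hR, List.pairwise_reverse]
    refine List.Pairwise.map _ (fun a b h => h) ?_
    refine hpairF2.imp_of_mem ?_
    intro a b ha hb hab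
    obtain ⟨ha1, haM, ⟨ca, hca⟩, -, -⟩ := hmemF2 a ha
    obtain ⟨hb1, hbM, ⟨cb, hcb⟩, -, -⟩ := hmemF2 b hb
    rw [pv_floordiv_exact M a ca ha1 hca, pv_floordiv_exact M b cb hb1 hcb]
    have hca1 : 1 ≤ ca := by nlinarith
    have hcb1 : 1 ≤ cb := by nlinarith
    nlinarith
  have hpairT2 : List.Pairwise (· < ·) T2 :=
    (PySem.List.pairwise_lt_pyRange_one (s + 1) (M + 1)).filter _
  have hmem : ∀ q, q ∈ R ↔ q ∈ T2 := by
    intro q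
    rw [hR, hT2, List.mem_reverse, List.mem_map]
    constructor
    · rintro ⟨d, hd, hfd⟩
      obtain ⟨hd1, hdM, ⟨c, hc⟩, hdne, hdr⟩ := hmemF2 d hd
      rw [pv_floordiv_exact M d c hd1 hc] at hfd hdr
      subst hfd
      have hc1 : 1 ≤ c := by nlinarith
      have hdc : d ≤ c := by nlinarith
      have hdq : d < c := by
        rcases lt_or_eq_of_le hdc with hlt | heq
        · exact hlt
        · exact absurd (by rw [hc, ← heq] : d * d = M) hdne
      have hcM : c ≤ M := by nlinarith
      have hsc : s < c := by nlinarith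
      refine List.mem_filter.2 ⟨PySem.List.mem_pyRange_one.2 ⟨by omega, by omega⟩, ?_⟩
      simp only [decide_eq_true_eq]
      exact ⟨(PySem.Int.mod_eq_zero_iff_dvd M c).2 ⟨d, by rw [hc]; ring⟩, hdr⟩
    · intro hq
      have hh := List.mem_filter.1 hq
      have hrange := PySem.List.mem_pyRange_one.1 hh.1
      have hp := of_decide_eq_true hh.2
      obtain ⟨e, he⟩ := (PySem.Int.mod_eq_zero_iff_dvd M q).1 hp.1
      have hq1 : 1 ≤ q := by omega
      have he1 : 1 ≤ e := by nlinarith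
      have hqq : M < q * q := by nlinarith
      have heq : e < q := by nlinarith
      have heeM : e * e ≤ M := by nlinarith
      have heene : e * e ≠ M := by nlinarith
      refine ⟨e, List.mem_filter.2 ⟨PySem.List.mem_pyRange_one.2 ⟨he1, by nlinarith⟩, ?_⟩,
        pv_floordiv_exact M e q he1 (by linarith [he])⟩
      simp only [decide_eq_true_eq]
      refine ⟨heeM, (PySem.Int.mod_eq_zero_iff_dvd M e).2 ⟨q, by linarith [he]⟩, heene, ?_⟩
      rw [pv_floordiv_exact M e q he1 (by linarith [he])]
      exact hp.2
  have hperm : T2.Perm R :=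
    (List.perm_ext_iff_of_nodup (hpairT2.nodup) (hpairR.nodup)).2
      (fun a => ((hmem a).symm))
  have e1 : PySem.List.sorted R id = R :=
    PySem.List.sorted_eq_of_perm_of_pairwise_lt R R id (List.Perm.refl R) (by simpa using hpairR)
  have e2 : PySem.List.sorted R id = T2 :=
    PySem.List.sorted_eq_of_perm_of_pairwise_lt R T2 id hperm (by simpa using hpairT2)
  rw [← e1, e2]

-- A's output for positive M = N - r is the full ascending divisor scan
theorem pv_A_eq_scan (M r : Int) (hM : 1 ≤ M) :
    (pvLoopA M r 1 [] []).1 ++ (pvLoopA M r 1 [] []).2.reverse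
    = (PySem.List.pyRange 1 (M + 1) 1).filter (fun q => decide (PySem.Int.mod M q = 0 ∧ r < q)) := by
  set s := ((Nat.sqrt M.toNat : Nat) : Int) with hs
  have hs0 : (0 : Int) ≤ s := Int.natCast_nonneg _
  have hsle : s * s ≤ M := by
    have h2 : (Nat.sqrt M.toNat) * (Nat.sqrt M.toNat) ≤ M.toNat := by
      nlinarith [Nat.sqrt_le' M.toNat]
    have h3 : s * s ≤ (M.toNat : Int) := by rw [hs]; exact_mod_cast h2
    omega
  have hslt : M < (s + 1) * (s + 1) := by
    have h2 : M.toNat < (Nat.sqrt M.toNat + 1) * (Nat.sqrt M.toNat + 1) := by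
      nlinarith [Nat.lt_succ_sqrt' M.toNat]
    have h3 : (M.toNat : Int) < (s + 1) * (s + 1) := by rw [hs]; exact_mod_cast h2
    omega
  have hs1 : 1 ≤ s := by nlinarith
  have hsM : s ≤ M := by nlinarith
  rw [pvLoopA_spec M r (M + 1 - 1).toNat 1 le_rfl (by omega) [] []]
  simp only [List.nil_append]
  have hsplit := PySem.List.pyRange_one_append 1 (s + 1) (M + 1) (by omega) (by omega)
  have hF1 : (PySem.List.pyRange 1 (M + 1) 1).filter
      (fun d => decide (d * d ≤ M ∧ (PySem.Int.mod M d = 0 ∧ r < d)))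
      = (PySem.List.pyRange 1 (s + 1) 1).filter (fun q => decide (PySem.Int.mod M q = 0 ∧ r < q)) := by
    rw [hsplit, List.filter_append]
    have h2 : (PySem.List.pyRange (s + 1) (M + 1) 1).filter
        (fun d => decide (d * d ≤ M ∧ (PySem.Int.mod M d = 0 ∧ r < d))) = [] := by
      apply List.filter_eq_nil_iff.2
      intro d hd
      have hm := PySem.List.mem_pyRange_one.1 hd
      have hdd : ¬ d * d ≤ M := by nlinarith [hm.1, hm.2]
      simp [hdd]
    rw [h2, List.append_nil]
    apply List.filter_congr
    intro d hd
    have hm := PySem.List.mem_pyRange_one.1 hd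
    have hdd : d * d ≤ M := by nlinarith [hm.1, hm.2]
    simp [hdd]
  have hT : (PySem.List.pyRange 1 (M + 1) 1).filter (fun q => decide (PySem.Int.mod M q = 0 ∧ r < q))
      = (PySem.List.pyRange 1 (s + 1) 1).filter (fun q => decide (PySem.Int.mod M q = 0 ∧ r < q))
        ++ (PySem.List.pyRange (s + 1) (M + 1) 1).filter (fun q => decide (PySem.Int.mod M q = 0 ∧ r < q)) := by
    rw [hsplit, List.filter_append]
  rw [hF1, hT, pv_pairing M r s hM hs1 hsle hslt]

-- ---------- B side: the generated list holds exactly the positive divisors of M ----------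

-- adding one more factor p to the divisor pool: divisors of C*p^(i+1) are the divisors
-- of C*p^i together with b*p^(i+1) for b a divisor of C (ℕ version)
theorem pv_step_divisors_nat (C p i : ℕ) (_hC : 0 < C) (hprime : p.Prime) (hpC : ¬ p ∣ C) (x : ℕ) :
    (x ∣ C * p ^ (i + 1) ∧ 0 < x) ↔
      ((x ∣ C * p ^ i ∧ 0 < x) ∨ ∃ b, (b ∣ C ∧ 0 < b) ∧ x = b * p ^ (i + 1)) := by
  constructor
  · rintro ⟨hxd, hx0⟩
    obtain ⟨e, u, hpu, hxu⟩ := Nat.exists_eq_pow_mul_and_not_dvd (by omega : x ≠ 0) p hprime.ne_one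
    have hu0 : 0 < u := by
      rcases Nat.eq_zero_or_pos u with h | h
      · subst h; simp at hxu; omega
      · exact h
    have hudvd : u ∣ C * p ^ (i + 1) := dvd_trans ⟨p ^ e, by rw [hxu]; ring⟩ hxd
    have huC : u ∣ C :=
      (Nat.Coprime.pow_right _ ((hprime.coprime_iff_not_dvd.2 hpu).symm)).dvd_of_dvd_mul_right hudvd
    have he : e ≤ i + 1 := by
      by_contra hgt
      have h1 : p ^ (i + 2) ∣ x := dvd_trans (pow_dvd_pow p (by omega)) ⟨u, hxu⟩
      have h2 : p ^ (i + 1) * p ∣ p ^ (i + 1) * C := by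
        have : p ^ (i + 2) ∣ C * p ^ (i + 1) := dvd_trans h1 hxd
        calc p ^ (i + 1) * p = p ^ (i + 2) := by ring
          _ ∣ C * p ^ (i + 1) := this
          _ = p ^ (i + 1) * C := by ring
      exact hpC ((mul_dvd_mul_iff_left (pow_ne_zero (i + 1) hprime.pos.ne')).1 h2)
    rcases Nat.lt_or_ge e (i + 1) with hlt | hge
    · left
      refine ⟨?_, hx0⟩
      calc x = p ^ e * u := hxu
        _ ∣ p ^ i * C := mul_dvd_mul (pow_dvd_pow p (by omega)) huC
        _ = C * p ^ i := by ring
    · have he' : e = i + 1 := le_antisymm he hge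
      right
      exact ⟨u, ⟨huC, hu0⟩, by rw [hxu, he']; ring⟩
  · rintro (⟨hd, hx⟩ | ⟨b, ⟨hbC, hb0⟩, rfl⟩)
    · refine ⟨dvd_trans hd ?_, hx⟩
      calc C * p ^ i ∣ C * p ^ i * p := dvd_mul_right _ _
        _ = C * p ^ (i + 1) := by ring
    · exact ⟨mul_dvd_mul hbC dvd_rfl, Nat.mul_pos hb0 (pow_pos hprime.pos _)⟩

-- the same step over ℤ for positive values
theorem pv_step_divisors (C p : Int) (i : ℕ) (hC : 0 < C) (hp : 0 < p)
    (hprime : Nat.Prime p.toNat) (hpC : ¬ p ∣ C) (x : Int) :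
    (x ∣ C * p ^ (i + 1) ∧ 0 < x) ↔
      ((x ∣ C * p ^ i ∧ 0 < x) ∨ ∃ b, (b ∣ C ∧ 0 < b) ∧ x = b * p ^ (i + 1)) := by
  obtain ⟨Cn, rfl⟩ := Int.eq_ofNat_of_zero_le hC.le
  obtain ⟨pn, rfl⟩ := Int.eq_ofNat_of_zero_le hp.le
  have hCn : 0 < Cn := by exact_mod_cast hC
  have hpn : Nat.Prime pn := by simpa using hprime
  have hpCn : ¬ pn ∣ Cn := fun h => hpC (by exact_mod_cast h)
  constructor
  · rintro ⟨hxd, hx0⟩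
    obtain ⟨xn, rfl⟩ := Int.eq_ofNat_of_zero_le hx0.le
    have h1 : xn ∣ Cn * pn ^ (i + 1) := by exact_mod_cast hxd
    have h0 : 0 < xn := by exact_mod_cast hx0
    rcases (pv_step_divisors_nat Cn pn i hCn hpn hpCn xn).1 ⟨h1, h0⟩ with ⟨hd, _⟩ | ⟨b, ⟨hb, hb0⟩, hx⟩
    · exact Or.inl ⟨by exact_mod_cast hd, hx0⟩
    · exact Or.inr ⟨(b : Int), ⟨by exact_mod_cast hb, by exact_mod_cast hb0⟩, by exact_mod_cast hx⟩
  · rintro (⟨hd, hx0⟩ | ⟨b, ⟨hb, hb0⟩, rfl⟩)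
    · refine ⟨dvd_trans hd ?_, hx0⟩
      calc ((Cn : Int)) * (pn : Int) ^ i ∣ (Cn : Int) * (pn : Int) ^ i * (pn : Int) := dvd_mul_right _ _
        _ = (Cn : Int) * (pn : Int) ^ (i + 1) := by ring
    · refine ⟨mul_dvd_mul hb dvd_rfl, ?_⟩
      have hpp : (0 : Int) < (pn : Int) ^ (i + 1) := pow_pos (by exact_mod_cast hpn.pos) _
      nlinarith

-- inner loop: strips every factor p from m, multiplying the divisor pool along
theorem pv_inner_spec (p : Int) (hp2 : 2 ≤ p) (hprime : Nat.Prime p.toNat) :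
    ∀ (fuel : ℕ) (m C : Int) (i : ℕ) (block divs : List Int),
    0 < m → m.toNat ≤ fuel → 0 < C → ¬ p ∣ C →
    (∀ x, x ∈ divs ↔ (x ∣ C * p ^ i ∧ 0 < x)) →
    (∀ x, x ∈ block ↔ ∃ b, (b ∣ C ∧ 0 < b) ∧ x = b * p ^ i) →
    ∃ j : ℕ,
      (pvFactInner fuel m p block divs).1 * p ^ j = m ∧
      0 < (pvFactInner fuel m p block divs).1 ∧
      ¬ p ∣ (pvFactInner fuel m p block divs).1 ∧
      (∀ x, x ∈ (pvFactInner fuel m p block divs).2 ↔ (x ∣ C * p ^ (i + j) ∧ 0 < x)) := by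
  intro fuel
  induction fuel with
  | zero =>
    intro m C i block divs hm hfuel
    omega
  | succ f ih =>
    intro m C i block divs hm hfuel hC hpC hdivs hblock
    by_cases hdv : PySem.Int.mod m p = 0
    · obtain ⟨t, rfl⟩ : p ∣ m := (PySem.Int.mod_eq_zero_iff_dvd m p).1 hdv
      have ht0 : 0 < t := by nlinarith
      have htlt : t < p * t := by nlinarith
      have htf : t.toNat ≤ f := by omega
      have hfd : PySem.Int.floordiv (p * t) p = t := pv_floordiv_exact (p * t) p t (by omega) rfl
      have hstep := pv_step_divisors C p i hC (by omega) hprime hpC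
      have hblock' : ∀ x, x ∈ block.map (fun d => d * p) ↔
          ∃ b, (b ∣ C ∧ 0 < b) ∧ x = b * p ^ (i + 1) := by
        intro x
        simp only [List.mem_map]
        constructor
        · rintro ⟨d, hd, rfl⟩
          obtain ⟨b, hb, rfl⟩ := (hblock d).1 hd
          exact ⟨b, hb, by ring⟩
        · rintro ⟨b, hb, rfl⟩
          exact ⟨b * p ^ i, (hblock _).2 ⟨b, hb, rfl⟩, by ring⟩
      have hdivs' : ∀ x, x ∈ divs ++ block.map (fun d => d * p) ↔
          (x ∣ C * p ^ (i + 1) ∧ 0 < x) := by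
        intro x
        rw [List.mem_append, hdivs x, hblock' x, ← hstep x]
      obtain ⟨j, hj1, hj2, hj3, hj4⟩ :=
        ih t C (i + 1) (block.map (fun d => d * p)) (divs ++ block.map (fun d => d * p))
          ht0 htf hC hpC hdivs' hblock'
      refine ⟨j + 1, ?_, ?_, ?_, ?_⟩ <;>
        simp only [pvFactInner, if_pos hdv, hfd]
      · rw [pow_succ, ← mul_assoc, hj1]; ring
      · exact hj2
      · exact hj3
      · intro x
        rw [show i + (j + 1) = (i + 1) + j by omega] at *
        exact hj4 x
    · refine ⟨0, ?_, ?_, ?_, ?_⟩ <;> simp only [pvFactInner, if_neg hdv]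
      · simp
      · exact hm
      · exact fun h => hdv ((PySem.Int.mod_eq_zero_iff_dvd _ p).2 h)
      · simpa using hdivs

-- exit of the outer loop: the remaining cofactor is 1 or a prime not dividing C
theorem pv_exit (m p C : Int) (divs : List Int) (hm : 0 < m) (hp : 2 ≤ p) (hC : 0 < C)
    (hloop : ¬ p * p ≤ m)
    (hdivs : ∀ x, x ∈ divs ↔ (x ∣ C ∧ 0 < x))
    (hCp : ∀ l : ℕ, l.Prime → (l : Int) ∣ C → (l : Int) < p)
    (hmp : ∀ l : ℕ, l.Prime → (l : Int) ∣ m → p ≤ (l : Int)) :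
    0 < C ∧ (∀ x, x ∈ divs ↔ (x ∣ C ∧ 0 < x)) ∧
      (m = 1 ∨ (Nat.Prime m.toNat ∧ ¬ m ∣ C)) := by
  refine ⟨hC, hdivs, ?_⟩
  by_cases hm1 : m = 1
  · exact Or.inl hm1
  · have hm2 : 2 ≤ m := by omega
    have hmprime : Nat.Prime m.toNat := by
      by_contra hnp
      have hl := Nat.minFac_prime (show m.toNat ≠ 1 by omega)
      have hld : (m.toNat.minFac : Int) ∣ m := by
        have h := Int.natCast_dvd_natCast.2 (Nat.minFac_dvd m.toNat)
        rwa [Int.toNat_of_nonneg (by omega : (0:Int) ≤ m)] at h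
      have hge := hmp _ hl hld
      have hsq : m.toNat.minFac ^ 2 ≤ m.toNat := Nat.minFac_sq_le_self (by omega) hnp
      have hsq' : (m.toNat.minFac : Int) * (m.toNat.minFac : Int) ≤ m := by
        have h5 : (m.toNat.minFac * m.toNat.minFac : ℕ) ≤ m.toNat := by nlinarith [hsq]
        have h6 : ((m.toNat.minFac * m.toNat.minFac : ℕ) : Int) ≤ ((m.toNat : ℕ) : Int) := by
          exact_mod_cast h5
        push_cast at h6
        rwa [Int.toNat_of_nonneg (le_of_lt hm)] at h6
      exact hloop (by nlinarith)
    refine Or.inr ⟨hmprime, fun hdC => ?_⟩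
    have hcast : ((m.toNat : ℕ) : Int) = m := Int.toNat_of_nonneg (by omega)
    have h1 := hCp m.toNat hmprime (by rwa [hcast])
    have h2 := hmp m.toNat hmprime (by rw [hcast])
    omega

-- outer loop invariant: divs always holds exactly the positive divisors of the
-- processed part C, whose prime factors are < p, while m keeps the factors ≥ p
theorem pv_outer_spec (M : Int) :
    ∀ (fuel : ℕ) (m p C : Int) (divs : List Int),
    0 < m → 2 ≤ p → 0 < C → C * m = M →
    m + 1 ≤ p + fuel →
    (∀ x, x ∈ divs ↔ (x ∣ C ∧ 0 < x)) →
    (∀ l : ℕ, l.Prime → (l : Int) ∣ C → (l : Int) < p) →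
    (∀ l : ℕ, l.Prime → (l : Int) ∣ m → p ≤ (l : Int)) →
    ∃ C' : Int,
      0 < C' ∧ C' * (pvFactOuter fuel m p divs).1 = M ∧
      0 < (pvFactOuter fuel m p divs).1 ∧
      (∀ x, x ∈ (pvFactOuter fuel m p divs).2 ↔ (x ∣ C' ∧ 0 < x)) ∧
      ((pvFactOuter fuel m p divs).1 = 1 ∨
        (Nat.Prime (pvFactOuter fuel m p divs).1.toNat ∧
          ¬ (pvFactOuter fuel m p divs).1 ∣ C')) := by
  intro fuel
  induction fuel with
  | zero =>
    intro m p C divs hm hp hC hCm hfuel hdivs hCp hmp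
    have hloop : ¬ p * p ≤ m := fun h => by
      have h1 := pv_le_of_sq_le h
      push_cast at hfuel
      omega
    obtain ⟨h1, h2, h3⟩ := pv_exit m p C divs hm hp hC hloop hdivs hCp hmp
    exact ⟨C, h1, hCm, hm, h2, h3⟩
  | succ f ih =>
    intro m p C divs hm hp hC hCm hfuel hdivs hCp hmp
    by_cases hloop : p * p ≤ m
    · have hm4 : 4 ≤ m := by nlinarith
      by_cases hpm : p ∣ m
      · -- p is prime here: every prime factor of m is ≥ p and p's least factor divides m
        have hpprime : Nat.Prime p.toNat := by
          have hl := Nat.minFac_prime (show p.toNat ≠ 1 by omega)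
          have hld : (p.toNat.minFac : Int) ∣ p := by
            have h := Int.natCast_dvd_natCast.2 (Nat.minFac_dvd p.toNat)
            rwa [Int.toNat_of_nonneg (by omega : (0:Int) ≤ p)] at h
          have h1 := hmp _ hl (hld.trans hpm)
          have h2 : (p.toNat.minFac : Int) ≤ p := by
            have h := Nat.minFac_le (show 0 < p.toNat by omega)
            have h' : ((p.toNat.minFac : ℕ) : Int) ≤ ((p.toNat : ℕ) : Int) := by exact_mod_cast h
            rwa [Int.toNat_of_nonneg (by omega : (0:Int) ≤ p)] at h'
          have heq : p.toNat.minFac = p.toNat := by omega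
          rw [← heq]
          exact hl
        have hpC : ¬ p ∣ C := fun h => by
          have := hCp p.toNat hpprime (by rwa [Int.toNat_of_nonneg (by omega : (0:Int) ≤ p)])
          rw [Int.toNat_of_nonneg (by omega : (0:Int) ≤ p)] at this
          omega
        have hdivs0 : ∀ x, x ∈ divs ↔ (x ∣ C * p ^ 0 ∧ 0 < x) := by simpa using hdivs
        have hblock0 : ∀ x, x ∈ divs ↔ ∃ b, (b ∣ C ∧ 0 < b) ∧ x = b * p ^ 0 := by
          intro x
          rw [hdivs x]
          constructor
          · rintro ⟨h1, h2⟩; exact ⟨x, ⟨h1, h2⟩, by simp⟩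
          · rintro ⟨b, hb, rfl⟩; simpa using hb
        obtain ⟨j, hj1, hj2, hj3, hj4⟩ :=
          pv_inner_spec p hp hpprime m.toNat m C 0 divs divs hm le_rfl hC hpC hdivs0 hblock0
        set m' := (pvFactInner m.toNat m p divs divs).1 with hm'
        set divs' := (pvFactInner m.toNat m p divs divs).2 with hdivs'
        have hpj : (1 : Int) ≤ p ^ j := one_le_pow₀ (by omega)
        have hple : m' ≤ m := by nlinarith
        obtain ⟨C', hh1, hh2, hh3, hh4, hh5⟩ :=
          ih m' (p + 1) (C * p ^ j) divs' hj2 (by omega) (by positivity)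
            (by rw [← hCm, ← hj1]; ring) (by omega)
            (by simpa using hj4)
            (by
              intro l hl hdl
              have hlint : Prime ((l : ℕ) : Int) := Nat.prime_iff_prime_int.mp hl
              rcases (hlint.dvd_mul).1 hdl with h | h
              · have := hCp l hl h; omega
              · have hlp : (l : Int) ∣ p := hlint.dvd_of_dvd_pow h
                have := Int.le_of_dvd (by omega) hlp
                omega)
            (by
              intro l hl hdl
              have hlm : (l : Int) ∣ m := by
                rw [← hj1]; exact Dvd.dvd.mul_right hdl _
              have hge := hmp l hl hlm
              rcases eq_or_lt_of_le hge with heq | hlt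
              · exfalso
                exact hj3 (heq ▸ hdl)
              · omega)
        refine ⟨C', hh1, ?_, ?_, ?_, ?_⟩ <;>
          simp only [pvFactOuter, if_pos hloop]
        · exact hh2
        · exact hh3
        · exact hh4
        · exact hh5
      · -- p does not divide m: the inner loop returns immediately
        have hinner : pvFactInner m.toNat m p divs divs = (m, divs) := by
          obtain ⟨f', hf'⟩ : ∃ f', m.toNat = f' + 1 := ⟨m.toNat - 1, by omega⟩
          rw [hf']
          simp only [pvFactInner,
            if_neg (fun hmod => hpm ((PySem.Int.mod_eq_zero_iff_dvd m p).1 hmod))]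
        obtain ⟨C', hh1, hh2, hh3, hh4, hh5⟩ :=
          ih m (p + 1) C divs hm (by omega) hC hCm (by omega) hdivs
            (by intro l hl hdl; have := hCp l hl hdl; omega)
            (by
              intro l hl hdl
              have hge := hmp l hl hdl
              rcases eq_or_lt_of_le hge with heq | hlt
              · exact absurd (heq ▸ hdl) hpm
              · omega)
        refine ⟨C', hh1, ?_, ?_, ?_, ?_⟩ <;>
          simp only [pvFactOuter, if_pos hloop, hinner]
        · exact hh2
        · exact hh3
        · exact hh4
        · exact hh5
    · obtain ⟨h1, h2, h3⟩ := pv_exit m p C divs hm hp hC hloop hdivs hCp hmp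
      refine ⟨C, h1, ?_, ?_, ?_, ?_⟩ <;> simp only [pvFactOuter, if_neg hloop]
      · exact hCm
      · exact hm
      · exact h2
      · exact h3

-- the final divisor pool of B holds exactly the positive divisors of M
theorem pv_B_divs (M : Int) (hM : 1 ≤ M) (x : Int) :
    x ∈ (if 1 < (pvFactOuter (M.toNat + 1) M 2 [1]).1
         then (pvFactOuter (M.toNat + 1) M 2 [1]).2
              ++ (pvFactOuter (M.toNat + 1) M 2 [1]).2.map
                  (fun d => d * (pvFactOuter (M.toNat + 1) M 2 [1]).1)
         else (pvFactOuter (M.toNat + 1) M 2 [1]).2)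
    ↔ (x ∣ M ∧ 0 < x) := by
  obtain ⟨C', hC'0, hC'M, hm0, hdivs, hlast⟩ :=
    pv_outer_spec M (M.toNat + 1) M 2 1 [1] (by omega) le_rfl one_pos (one_mul M) (by omega)
      (by
        intro y
        simp only [List.mem_singleton]
        constructor
        · rintro rfl; exact ⟨dvd_refl 1, one_pos⟩
        · rintro ⟨h1, h2⟩
          have := Int.le_of_dvd one_pos h1
          omega)
      (by
        intro l hl hdl
        have := Int.le_of_dvd one_pos hdl
        have := hl.two_le
        omega)
      (by
        intro l hl _
        have := hl.two_le
        exact_mod_cast this)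
  set res := pvFactOuter (M.toNat + 1) M 2 [1] with hres
  rcases hlast with h1 | ⟨hprime, hndvd⟩
  · rw [if_neg (by omega)]
    rw [h1, mul_one] at hC'M
    subst hC'M
    exact hdivs x
  · have hm2 : 2 ≤ res.1 := by
      have := hprime.two_le
      omega
    rw [if_pos (by omega)]
    have hstep := pv_step_divisors C' res.1 0 hC'0 (by omega) hprime hndvd x
    simp only [zero_add, pow_one, pow_zero, mul_one] at hstep
    rw [List.mem_append, List.mem_map, ← hC'M]
    constructor
    · rintro (hx | ⟨d, hd, rfl⟩)
      · exact hstep.2 (Or.inl ((hdivs x).1 hx))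
      · exact hstep.2 (Or.inr ⟨d, (hdivs d).1 hd, rfl⟩)
    · intro hx
      rcases hstep.1 hx with h | ⟨b, hb, rfl⟩
      · exact Or.inl ((hdivs x).2 h)
      · exact Or.inr ⟨b, (hdivs b).2 hb, rfl⟩

-- B's output written over the final divisor pool
theorem pv_alt_eq (N r : Int) :
    Reminder_Enumeration_alt N r =
      PySem.List.sorted
        (PySem.Set.ofList
          ((if 1 < (pvFactOuter ((N - r).toNat + 1) (N - r) 2 (if 1 ≤ N - r then [1] else [])).1
            then (pvFactOuter ((N - r).toNat + 1) (N - r) 2 (if 1 ≤ N - r then [1] else [])).2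
                 ++ (pvFactOuter ((N - r).toNat + 1) (N - r) 2 (if 1 ≤ N - r then [1] else [])).2.map
                     (fun d => d * (pvFactOuter ((N - r).toNat + 1) (N - r) 2 (if 1 ≤ N - r then [1] else [])).1)
            else (pvFactOuter ((N - r).toNat + 1) (N - r) 2 (if 1 ≤ N - r then [1] else [])).2).filter
            (fun d => decide (r < d)))) id := rfl

theorem Reminder_Enumeration_eq (N r : Int) :
    Reminder_Enumeration N r = Reminder_Enumeration_alt N r := by
  by_cases hM : N - r ≤ 0
  · -- M ≤ 0: both sides are []
    have hA : Reminder_Enumeration N r = [] := by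
      unfold Reminder_Enumeration
      rw [pvLoopA.eq_def, dif_neg (show ¬ (1 : Int) * 1 ≤ N - r by nlinarith)]
      simp
    have hout : pvFactOuter ((N - r).toNat + 1) (N - r) 2 (if 1 ≤ N - r then [1] else [])
        = (N - r, []) := by
      rw [if_neg (by omega : ¬ (1 : Int) ≤ N - r)]
      have h1 : (N - r).toNat + 1 = 0 + 1 := by omega
      rw [h1]
      simp only [pvFactOuter, if_neg (show ¬ (2 : Int) * 2 ≤ N - r by omega)]
    rw [hA, pv_alt_eq, hout]
    rw [if_neg (by omega : ¬ (1 : Int) < (((N - r, []) : Int × List Int)).1)]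
    rfl
  · have hM1 : 1 ≤ N - r := by omega
    have hA := pv_A_eq_scan (N - r) r hM1
    set T := (PySem.List.pyRange 1 (N - r + 1) 1).filter
        (fun q => decide (PySem.Int.mod (N - r) q = 0 ∧ r < q)) with hT
    have hAT : Reminder_Enumeration N r = T := by
      unfold Reminder_Enumeration
      exact hA
    rw [hAT, pv_alt_eq, if_pos hM1]
    set F := (if 1 < (pvFactOuter ((N - r).toNat + 1) (N - r) 2 [1]).1
          then (pvFactOuter ((N - r).toNat + 1) (N - r) 2 [1]).2
               ++ (pvFactOuter ((N - r).toNat + 1) (N - r) 2 [1]).2.map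
                   (fun d => d * (pvFactOuter ((N - r).toNat + 1) (N - r) 2 [1]).1)
          else (pvFactOuter ((N - r).toNat + 1) (N - r) 2 [1]).2).filter
        (fun d => decide (r < d)) with hF
    have hpairT : List.Pairwise (· < ·) T :=
      (PySem.List.pairwise_lt_pyRange_one 1 (N - r + 1)).filter _
    have hmemF : ∀ q, q ∈ PySem.Set.ofList F ↔ q ∈ T := by
      intro q
      rw [PySem.Set.mem_ofList, hF, List.mem_filter, hT, List.mem_filter,
        PySem.List.mem_pyRange_one]
      rw [pv_B_divs (N - r) hM1 q]
      simp only [decide_eq_true_eq]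
      constructor
      · rintro ⟨⟨hdvd, hpos⟩, hr⟩
        have := Int.le_of_dvd (by omega) hdvd
        exact ⟨⟨by omega, by omega⟩, (PySem.Int.mod_eq_zero_iff_dvd _ _).2 hdvd, hr⟩
      · rintro ⟨⟨h1, h2⟩, hmod, hr⟩
        exact ⟨⟨(PySem.Int.mod_eq_zero_iff_dvd _ _).1 hmod, by omega⟩, hr⟩
    have hperm : T.Perm (PySem.Set.ofList F) :=
      (List.perm_ext_iff_of_nodup hpairT.nodup (PySem.Set.nodup_ofList F)).2
        (fun a => (hmemF a).symm)
    exact (PySem.List.sorted_eq_of_perm_of_pairwise_lt (PySem.Set.ofList F) T id hperm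
      (by simpa using hpairT)).symm

-- ===== VERDICT (by name: the statement is the Claim_ definition above) =====
theorem Reminder_Enumeration_spec : Claim_equal_Reminder_Enumeration := by
  intro N r _ _
  exact Reminder_Enumeration_eq N r
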